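-- pv_equiv track=rewrite | github.com/sejeeswarank/KCTracker | backend/parser.py | _align_descriptions_to_dates
-- ===== SOURCE A (Python) =====
-- def _align_descriptions_to_dates(desc_lines, num_txns):
--     """
--     Align multi-line narration lines to transactions using prefix anchoring.
--
--     Each transaction's narration starts with a known prefix (UPI-, NEFT-, etc.).
--     Lines without prefixes are continuations of the previous transaction.
--     """
--     if not desc_lines or num_txns == 0:
--         return [""] * num_txns
--
--     # Known transaction start prefixes
--     prefixes = (
--         "UPI-", "NEFT-", "NEFT/", "IMPS-", "IMPS/", "RTGS-", "RTGS/",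
--         "ATM-", "ATM/", "POS-", "POS/", "INB-", "INB/", "MOB-", "MOB/",
--         "NET-", "NET/", "ATW-", "NFS-", "NFS/", "BIL-", "BIL/",
--         "ACH-", "ACH/", "ECS-", "ECS/", "MMT-", "MMT/",
--         "BY TRANSFER", "TO TRANSFER", "BY CLG", "TO CLG",
--         "INT.PD", "INTEREST", "CHQ DEP", "CASH DEP",
--     )
--
--     # Group lines by prefix anchors
--     groups = []
--     current = []
--
--     for line in desc_lines:
--         stripped = line.strip()
--         if not stripped:
--             continue
--         upper = stripped.upper()
--         if any(upper.startswith(p) for p in prefixes) and current: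
--             # New transaction starts — save previous group
--             groups.append(" ".join(current))
--             current = [stripped]
--         else:
--             current.append(stripped)
--
--     # Don't forget the last group
--     if current:
--         groups.append(" ".join(current))
--
--     # If prefix grouping found the right count, use it
--     if len(groups) == num_txns:
--         return groups
--
--     # If we got more groups than transactions, merge extras into last
--     if len(groups) > num_txns:
--         merged = groups[:num_txns - 1]
--         merged.append(" ".join(groups[num_txns - 1:]))
--         return merged
--
--     # If fewer groups (some txns don't start with a prefix), pad with empty
--     while len(groups) < num_txns:
--         groups.append("")
--     return groups
-- ===== SOURCE B (Python) =====
-- def _align_descriptions_to_dates(desc_lines, num_txns):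
--     """Two-pass re-implementation: collect stripped lines, find anchor boundary
--     indices, slice between successive boundaries, then reconcile the count."""
--     if not desc_lines or num_txns == 0:
--         return [""] * num_txns
--
--     prefixes = (
--         "UPI-", "NEFT-", "NEFT/", "IMPS-", "IMPS/", "RTGS-", "RTGS/",
--         "ATM-", "ATM/", "POS-", "POS/", "INB-", "INB/", "MOB-", "MOB/",
--         "NET-", "NET/", "ATW-", "NFS-", "NFS/", "BIL-", "BIL/",
--         "ACH-", "ACH/", "ECS-", "ECS/", "MMT-", "MMT/",
--         "BY TRANSFER", "TO TRANSFER", "BY CLG", "TO CLG",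
--         "INT.PD", "INTEREST", "CHQ DEP", "CASH DEP",
--     )
--
--     lines = [s for s in (l.strip() for l in desc_lines) if s]
--     cuts = [i for i in range(1, len(lines))
--             if lines[i].upper().startswith(prefixes)]
--     bounds = [0] + cuts + [len(lines)]
--     groups = [" ".join(lines[a:b]) for a, b in zip(bounds, bounds[1:])]
--
--     if len(groups) > num_txns:
--         return groups[:num_txns - 1] + [" ".join(groups[num_txns - 1:])]
--     return groups + [""] * (num_txns - len(groups))
-- ===== Notes on version B (the rewrite author's own statement) =====
-- stated objective: alternative
-- what changed: Replaces A's single stateful accumulation loop (groups/current lists mutated per line) by a declarative two-pass pipeline: build the stripped non-empty lines, compute anchor boundary indices, slice between successive boundaries and join each slice, then one arithmetic reconciliation (merge-or-pad) instead of A's three-way branch with a while loop.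
import Mathlib
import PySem

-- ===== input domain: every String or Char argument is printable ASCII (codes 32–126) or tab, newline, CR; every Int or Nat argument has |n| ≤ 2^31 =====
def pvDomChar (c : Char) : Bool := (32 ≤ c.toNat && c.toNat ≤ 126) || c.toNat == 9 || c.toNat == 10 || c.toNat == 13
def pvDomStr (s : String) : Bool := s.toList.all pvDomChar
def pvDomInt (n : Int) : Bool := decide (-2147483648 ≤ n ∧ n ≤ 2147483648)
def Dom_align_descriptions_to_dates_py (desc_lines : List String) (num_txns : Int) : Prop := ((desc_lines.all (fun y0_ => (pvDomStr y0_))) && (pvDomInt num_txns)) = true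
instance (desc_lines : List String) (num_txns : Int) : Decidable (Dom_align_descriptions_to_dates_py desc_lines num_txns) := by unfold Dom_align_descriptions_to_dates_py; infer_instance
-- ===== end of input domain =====

-- B replaces A's stateful accumulation loop by a two-pass boundary-index/slice pipeline
-- (objective: alternative decomposition, same asymptotic cost); return values proved equal on all inputs.

-- ===== PORT A =====
-- shared constant: the tuple `prefixes`
def pvPrefixes : List String :=
  ["UPI-", "NEFT-", "NEFT/", "IMPS-", "IMPS/", "RTGS-", "RTGS/",
   "ATM-", "ATM/", "POS-", "POS/", "INB-", "INB/", "MOB-", "MOB/",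
   "NET-", "NET/", "ATW-", "NFS-", "NFS/", "BIL-", "BIL/",
   "ACH-", "ACH/", "ECS-", "ECS/", "MMT-", "MMT/",
   "BY TRANSFER", "TO TRANSFER", "BY CLG", "TO CLG",
   "INT.PD", "INTEREST", "CHQ DEP", "CASH DEP"]

-- the body of A's `for line in desc_lines` loop, state = (groups, current)
def pvLoopA (st : List String × List String) (line : String) : List String × List String :=
  let stripped := PySem.Str.strip line
  if stripped = "" then st
  else
    let upper := PySem.Str.upper stripped
    if (pvPrefixes.any (fun p => PySem.Str.startswith upper p)) && !st.2.isEmpty then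
      (st.1 ++ [PySem.Str.join " " st.2], [stripped])
    else (st.1, st.2 ++ [stripped])

-- A's `while len(groups) < num_txns: groups.append("")`
def pvPadTo (groups : List String) (num_txns : Int) : List String :=
  if (groups.length : Int) < num_txns then pvPadTo (groups ++ [""]) num_txns else groups
termination_by (num_txns - groups.length).toNat
decreasing_by simp; omega

def align_descriptions_to_dates_py (desc_lines : List String) (num_txns : Int) : List String :=
  if desc_lines = [] ∨ num_txns = 0 then PySem.List.pyRepeat [""] num_txns
  else
    let st := desc_lines.foldl pvLoopA ([], [])
    let groups := if !st.2.isEmpty then st.1 ++ [PySem.Str.join " " st.2] else st.1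
    if (groups.length : Int) = num_txns then groups
    else if num_txns < (groups.length : Int) then
      PySem.List.slice groups none (some (num_txns - 1)) ++
        [PySem.Str.join " " (PySem.List.slice groups (some (num_txns - 1)) none)]
    else pvPadTo groups num_txns

-- ===== PORT B =====
def align_descriptions_to_dates_py_alt (desc_lines : List String) (num_txns : Int) : List String :=
  if desc_lines = [] ∨ num_txns = 0 then PySem.List.pyRepeat [""] num_txns
  else
    let lines := (desc_lines.map PySem.Str.strip).filter (fun s => s != "")
    let cuts := (PySem.List.pyRange 1 (lines.length : Int) 1).filter
      (fun i => pvPrefixes.any (fun p =>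
        PySem.Str.startswith (PySem.Str.upper (PySem.List.pyGetD lines i "")) p))
    let bounds := 0 :: cuts ++ [(lines.length : Int)]
    let groups := (bounds.zip bounds.tail).map
      (fun ab => PySem.Str.join " " (PySem.List.slice lines (some ab.1) (some ab.2)))
    if num_txns < (groups.length : Int) then
      PySem.List.slice groups none (some (num_txns - 1)) ++
        [PySem.Str.join " " (PySem.List.slice groups (some (num_txns - 1)) none)]
    else groups ++ PySem.List.pyRepeat [""] (num_txns - groups.length)

-- ===== PRECONDITION & SPEC =====
def Spec_align_descriptions_to_dates_py (desc_lines : List String) (num_txns : Int) (out : List String) : Prop := out = align_descriptions_to_dates_py_alt desc_lines num_txns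
instance (desc_lines : List String) (num_txns : Int) (out : List String) : Decidable (Spec_align_descriptions_to_dates_py desc_lines num_txns out) := by unfold Spec_align_descriptions_to_dates_py; infer_instance

-- ===== CLAIM (what is proved, stated in full; the proofs are below) =====
def Claim_equal_align_descriptions_to_dates_py : Prop := ∀ (desc_lines : List String) (num_txns : Int), Dom_align_descriptions_to_dates_py desc_lines num_txns → Spec_align_descriptions_to_dates_py desc_lines num_txns (align_descriptions_to_dates_py desc_lines num_txns)

-- ===== LEMMAS AND PROOFS =====

-- proof-side abbreviations
def pvAnchor (s : String) : Bool :=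
  pvPrefixes.any (fun p => PySem.Str.startswith (PySem.Str.upper s) p)

def pvJ (l : List String) : String := PySem.Str.join " " l

-- canonical grouping: split at anchors, current group `cur` (nonempty)
def pvGsplit (cur : List String) : List String → List String
  | [] => [pvJ cur]
  | x :: xs => if pvAnchor x then pvJ cur :: pvGsplit [x] xs else pvGsplit (cur ++ [x]) xs

def pvStripLines (desc : List String) : List String :=
  (desc.map PySem.Str.strip).filter (fun s => s != "")

def pvBStep (st : List String × List String) (s : String) : List String × List String :=
  if pvAnchor s && !st.2.isEmpty then (st.1 ++ [pvJ st.2], [s]) else (st.1, st.2 ++ [s])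

def pvFin (st : List String × List String) : List String :=
  if !st.2.isEmpty then st.1 ++ [PySem.Str.join " " st.2] else st.1

-- A's groups / B's groups as standalone functions (bodies copied from the ports)
def pvGroupsA (desc_lines : List String) : List String :=
  pvFin (desc_lines.foldl pvLoopA ([], []))

def pvGroupsB (lines : List String) : List String :=
  let cuts := (PySem.List.pyRange 1 (lines.length : Int) 1).filter
    (fun i => pvPrefixes.any (fun p =>
      PySem.Str.startswith (PySem.Str.upper (PySem.List.pyGetD lines i "")) p))
  let bounds := 0 :: cuts ++ [(lines.length : Int)]
  (bounds.zip bounds.tail).map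
    (fun ab => PySem.Str.join " " (PySem.List.slice lines (some ab.1) (some ab.2)))

-- chunk M into joined slices between successive cut indices, starting at s
def pvChunks (M : List String) (s : Nat) : List Nat → List String
  | [] => [pvJ (M.drop s)]
  | c :: cs => pvJ ((M.drop s).take (c - s)) :: pvChunks M c cs

def pvRelCuts (xs : List String) : List Nat :=
  (List.range xs.length).filter (fun j => pvAnchor (xs.getD j ""))

-- (A1) A's loop over desc_lines is pvBStep over the stripped non-empty lines
theorem pvFoldA_eq (desc : List String) (st : List String × List String) :
    desc.foldl pvLoopA st = (pvStripLines desc).foldl pvBStep st := by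
  induction desc generalizing st with
  | nil => rfl
  | cons l t ih =>
    by_cases h : PySem.Str.strip l = ""
    · have h1 : pvStripLines (l :: t) = pvStripLines t := by
        simp [pvStripLines, h]
      have h2 : pvLoopA st l = st := by
        simp [pvLoopA, h]
      rw [h1, List.foldl_cons, h2, ih]
    · have h1 : pvStripLines (l :: t) = PySem.Str.strip l :: pvStripLines t := by
        simp [pvStripLines, h]
      have h2 : pvLoopA st l = pvBStep st (PySem.Str.strip l) := by
        simp [pvLoopA, pvBStep, pvAnchor, pvJ, h]
      rw [h1, List.foldl_cons, List.foldl_cons, h2, ih]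

-- (A2) folding pvBStep from a nonempty current group is pvGsplit
theorem pvFoldB_gsplit (xs : List String) (g cur : List String) (h : cur ≠ []) :
    pvFin (xs.foldl pvBStep (g, cur)) = g ++ pvGsplit cur xs := by
  induction xs generalizing g cur with
  | nil =>
    simp [pvFin, pvGsplit, pvJ, h]
  | cons x xs ih =>
    have hcur : cur.isEmpty = false := by simp [h]
    rw [List.foldl_cons]
    by_cases hA : pvAnchor x
    · have hstep : pvBStep (g, cur) x = (g ++ [pvJ cur], [x]) := by
        simp [pvBStep, hA, hcur]
      rw [hstep, ih _ [x] (by simp)]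
      simp only [pvGsplit]
      rw [if_pos hA]
      simp
    · have hstep : pvBStep (g, cur) x = (g, cur ++ [x]) := by
        simp [pvBStep, hA]
      rw [hstep, ih _ (cur ++ [x]) (by simp)]
      simp only [pvGsplit]
      rw [if_neg hA]

-- (B1) the zip-of-bounds map is pvChunks
theorem pvZipChunks (cs : List Nat) (s : Nat) (M : List String) :
    ((((s : Int) :: (cs.map (Nat.cast : Nat → Int)) ++ [(M.length : Int)]).zip
        ((cs.map (Nat.cast : Nat → Int)) ++ [(M.length : Int)])).map
      (fun ab => PySem.Str.join " " (PySem.List.slice M (some ab.1) (some ab.2))))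
    = pvChunks M s cs := by
  induction cs generalizing s with
  | nil =>
    show [PySem.Str.join " " (PySem.List.slice M (some (s : Int)) (some (M.length : Int)))]
      = pvChunks M s []
    rw [PySem.List.slice_natCast, List.take_of_length_le (by simp)]
    simp [pvChunks, pvJ]
  | cons c cs ih =>
    have hzip : (((s : Int) :: ((c :: cs).map (Nat.cast : Nat → Int)) ++ [(M.length : Int)]).zip
        (((c :: cs).map (Nat.cast : Nat → Int)) ++ [(M.length : Int)])) =
        ((s : Int), (c : Int)) ::
        (((c : Int) :: (cs.map (Nat.cast : Nat → Int)) ++ [(M.length : Int)]).zip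
          ((cs.map (Nat.cast : Nat → Int)) ++ [(M.length : Int)])) := by
      simp
    rw [hzip, List.map_cons, ih c]
    simp only [pvChunks]
    congr 1
    show PySem.Str.join " " (PySem.List.slice M (some (s : Int)) (some (c : Int)))
      = pvJ ((M.drop s).take (c - s))
    rw [PySem.List.slice_natCast]
    rfl

-- (B2) chunking is invariant under prepending a prefix and shifting all cuts
theorem pvChunks_shift (cs : List Nat) (s : Nat) (p M : List String) :
    pvChunks (p ++ M) (p.length + s) (cs.map (p.length + ·)) = pvChunks M s cs := by
  induction cs generalizing s with
  | nil => simp [pvChunks, List.drop_length_add_append]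
  | cons c cs ih =>
    simp only [List.map_cons, pvChunks]
    congr 1
    · rw [List.drop_length_add_append, Nat.add_sub_add_left]
    · exact ih c

theorem pvRelCuts_cons (y : String) (ys : List String) :
    pvRelCuts (y :: ys) =
      (if pvAnchor y then [0] else []) ++ (pvRelCuts ys).map (fun j => 1 + j) := by
  unfold pvRelCuts
  simp only [List.length_cons]
  rw [List.range_succ_eq_map, List.filter_cons, List.filter_map]
  have hpred : ((fun j => pvAnchor ((y :: ys).getD j "")) ∘ Nat.succ) =
      (fun j => pvAnchor (ys.getD j "")) := by
    funext j
    simp [Function.comp]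
  rw [hpred]
  have hmap : List.map Nat.succ
        (List.filter (fun j => pvAnchor (ys.getD j "")) (List.range ys.length)) =
      List.map (fun j => 1 + j)
        (List.filter (fun j => pvAnchor (ys.getD j "")) (List.range ys.length)) := by
    apply List.map_congr_left
    intro a _
    omega
  rw [hmap]
  by_cases hy : pvAnchor y
  · simp [hy]
  · simp [hy]

-- (B3) chunking at anchor cuts is pvGsplit
theorem pvChunks_gsplit (xs : List String) : ∀ (pre : List String), pre ≠ [] →
    pvChunks (pre ++ xs) 0 ((pvRelCuts xs).map (pre.length + ·)) = pvGsplit pre xs := by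
  induction xs with
  | nil =>
    intro pre h
    simp [pvRelCuts, pvChunks, pvGsplit]
  | cons y ys ih =>
    intro pre h
    rw [pvRelCuts_cons]
    by_cases hA : pvAnchor y
    · rw [if_pos hA, List.singleton_append, List.map_cons]
      simp only [pvChunks, pvGsplit]
      rw [if_pos hA]
      congr 1
      · simp [pvJ]
      · have h1 : ((pvRelCuts ys).map (fun j => 1 + j)).map (pre.length + ·) =
            ((pvRelCuts ys).map (fun j => 1 + j)).map (fun c => pre.length + c) := rfl
        have h2 := pvChunks_shift ((pvRelCuts ys).map (fun j => 1 + j)) 0 pre (y :: ys)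
        rw [Nat.add_zero] at h2
        have h3 := ih [y] (by simp)
        rw [Nat.add_zero, h1, h2]
        simpa using h3
    · rw [if_neg hA, List.nil_append, List.map_map]
      have hfe : ((pre.length + ·) ∘ (fun j => 1 + j)) = ((pre ++ [y]).length + ·) := by
        funext j
        simp only [Function.comp, List.length_append, List.length_cons, List.length_nil]
        omega
      rw [hfe]
      have hM : pre ++ y :: ys = (pre ++ [y]) ++ ys := by simp
      rw [hM, ih (pre ++ [y]) (by simp)]
      simp only [pvGsplit]
      rw [if_neg hA]

-- pad loop is append of replicate
theorem pvPadTo_aux (k : Nat) : ∀ (g : List String) (n : Int), (n - g.length).toNat = k →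
    pvPadTo g n = g ++ List.replicate k "" := by
  induction k with
  | zero =>
    intro g n hk
    rw [pvPadTo.eq_def, if_neg (by omega)]
    simp
  | succ k ih =>
    intro g n hk
    rw [pvPadTo.eq_def, if_pos (by omega)]
    rw [ih (g ++ [""]) n (by simp only [List.length_append, List.length_cons, List.length_nil]; omega)]
    simp [List.replicate_succ, List.append_assoc]

theorem pvPadTo_eq (g : List String) (n : Int) :
    pvPadTo g n = g ++ List.replicate (n - g.length).toNat "" :=
  pvPadTo_aux _ g n rfl

-- B's groups: empty lines give [""]
theorem pvGroupsB_nil : pvGroupsB [] = [""] := by decide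

-- B's groups coincide with pvGsplit on nonempty lines
theorem pvGroupsB_cons (x : String) (xs : List String) :
    pvGroupsB (x :: xs) = pvGsplit [x] xs := by
  unfold pvGroupsB
  have hcuts : (PySem.List.pyRange 1 ((x :: xs).length : Int) 1).filter
      (fun i => pvPrefixes.any (fun p =>
        PySem.Str.startswith (PySem.Str.upper (PySem.List.pyGetD (x :: xs) i "")) p)) =
      ((pvRelCuts xs).map (fun j => 1 + j)).map (Nat.cast : Nat → Int) := by
    rw [PySem.List.pyRange_one]
    have hlen : (((x :: xs).length : Int) - 1).toNat = xs.length := by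
      simp
    rw [hlen, List.filter_map]
    unfold pvRelCuts
    rw [List.map_map]
    simp only [Function.comp_def]
    have hfil : List.filter
        (fun k : Nat => pvPrefixes.any (fun p =>
          PySem.Str.startswith (PySem.Str.upper
            (PySem.List.pyGetD (x :: xs) ((1 : Int) + (k : Int)) "")) p))
        (List.range xs.length) =
        List.filter (fun j => pvAnchor (xs.getD j "")) (List.range xs.length) := by
      apply List.filter_congr
      intro k _
      have h1 : ((1 : Int) + (k : Int)) = (((1 + k : Nat) : Int)) := by push_cast; ring
      rw [h1, PySem.List.pyGetD_natCast]
      have h2 : (x :: xs).getD (1 + k) "" = xs.getD k "" := by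
        rw [Nat.add_comm]
        exact List.getD_cons_succ ..
      rw [h2, pvAnchor]
    rw [hfil]
    apply List.map_congr_left
    intro a _
    push_cast
    ring
  rw [hcuts]
  show ((((0 : Nat) : Int) :: (((pvRelCuts xs).map (fun j => 1 + j)).map (Nat.cast : Nat → Int))
          ++ [((x :: xs).length : Int)]).zip
        ((((pvRelCuts xs).map (fun j => 1 + j)).map (Nat.cast : Nat → Int))
          ++ [((x :: xs).length : Int)])).map
      (fun ab => PySem.Str.join " " (PySem.List.slice (x :: xs) (some ab.1) (some ab.2)))
    = pvGsplit [x] xs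
  rw [pvZipChunks ((pvRelCuts xs).map (fun j => 1 + j)) 0 (x :: xs)]
  have h3 := pvChunks_gsplit xs [x] (by simp)
  simpa using h3

-- A's groups are the canonical grouping of the stripped lines
theorem pvGroupsA_eq (desc : List String) :
    pvGroupsA desc = match pvStripLines desc with
      | [] => []
      | x :: xs => pvGsplit [x] xs := by
  unfold pvGroupsA
  rw [pvFoldA_eq]
  cases h : pvStripLines desc with
  | nil => rfl
  | cons x xs =>
    rw [List.foldl_cons]
    have hstep : pvBStep ([], []) x = ([], [x]) := by
      simp [pvBStep]
    rw [hstep]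
    exact pvFoldB_gsplit xs [] [x] (by simp)

-- the merge/pad tails of the two ports agree for any groups list G
theorem pvTail_eq (G : List String) (n : Int) :
    (if (G.length : Int) = n then G
     else if n < (G.length : Int) then
       PySem.List.slice G none (some (n - 1)) ++
         [PySem.Str.join " " (PySem.List.slice G (some (n - 1)) none)]
     else pvPadTo G n) =
    (if n < (G.length : Int) then
       PySem.List.slice G none (some (n - 1)) ++
         [PySem.Str.join " " (PySem.List.slice G (some (n - 1)) none)]
     else G ++ PySem.List.pyRepeat [""] (n - G.length)) := by
  by_cases h1 : (G.length : Int) = n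
  · rw [if_pos h1, if_neg (by omega)]
    rw [PySem.List.pyRepeat_singleton]
    have h2 : ((n - G.length : Int)).toNat = 0 := by omega
    simp [h2]
  · rw [if_neg h1]
    by_cases h2 : n < (G.length : Int)
    · rw [if_pos h2, if_pos h2]
    · rw [if_neg h2, if_neg h2, pvPadTo_eq, PySem.List.pyRepeat_singleton]

-- on all-blank input A's groups are [] and B's are [""]; the tails still agree
theorem pvEmptyGroups_eq (n : Int) (hne : n ≠ 0) :
    (if (0 : Int) = n then ([] : List String)
     else if n < (0 : Int) then
       PySem.List.slice ([] : List String) none (some (n - 1)) ++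
         [PySem.Str.join " " (PySem.List.slice ([] : List String) (some (n - 1)) none)]
     else pvPadTo [] n) =
    (if n < (1 : Int) then
       PySem.List.slice [""] none (some (n - 1)) ++
         [PySem.Str.join " " (PySem.List.slice ([""] : List String) (some (n - 1)) none)]
     else [""] ++ PySem.List.pyRepeat [""] (n - 1)) := by
  rw [if_neg (by omega)]
  by_cases hn : n < 0
  · rw [if_pos hn, if_pos (by omega)]
    have hkpos : 0 < (1 - n).toNat := by omega
    have hk' : n - 1 = -(((1 - n).toNat : Int)) := by omega
    rw [hk', PySem.List.slice_to_neg_natCast _ _ hkpos,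
        PySem.List.slice_to_neg_natCast _ _ hkpos,
        PySem.List.slice_from_neg_natCast _ _ hkpos,
        PySem.List.slice_from_neg_natCast _ _ hkpos]
    have h1 : ([] : List String).length - (1 - n).toNat = 0 := by simp
    have h2 : ([""] : List String).length - (1 - n).toNat = 0 := by
      simp only [List.length_cons, List.length_nil]
      omega
    rw [h1, h2]
    decide
  · rw [if_neg hn, if_neg (by omega)]
    rw [pvPadTo_eq, PySem.List.pyRepeat_singleton]
    have h3 : (n - (([] : List String).length : Int)).toNat = (n - 1).toNat + 1 := by
      simp only [List.length_nil, Nat.cast_zero]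
      omega
    rw [h3]
    simp [List.replicate_succ]

-- ===== VERDICT (by name: the statement is the Claim_ definition above) =====
theorem align_descriptions_to_dates_py_spec : Claim_equal_align_descriptions_to_dates_py := by
  intro desc n _
  unfold Spec_align_descriptions_to_dates_py
  unfold align_descriptions_to_dates_py align_descriptions_to_dates_py_alt
  by_cases hg : desc = [] ∨ n = 0
  · rw [if_pos hg, if_pos hg]
  · rw [if_neg hg, if_neg hg]
    have hne : n ≠ 0 := fun h => hg (Or.inr h)
    show (if ((pvGroupsA desc).length : Int) = n then pvGroupsA desc
          else if n < ((pvGroupsA desc).length : Int) then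
            PySem.List.slice (pvGroupsA desc) none (some (n - 1)) ++
              [PySem.Str.join " " (PySem.List.slice (pvGroupsA desc) (some (n - 1)) none)]
          else pvPadTo (pvGroupsA desc) n) =
         (if n < ((pvGroupsB (pvStripLines desc)).length : Int) then
            PySem.List.slice (pvGroupsB (pvStripLines desc)) none (some (n - 1)) ++
              [PySem.Str.join " "
                (PySem.List.slice (pvGroupsB (pvStripLines desc)) (some (n - 1)) none)]
          else pvGroupsB (pvStripLines desc) ++
            PySem.List.pyRepeat [""] (n - (pvGroupsB (pvStripLines desc)).length))
    rw [pvGroupsA_eq]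
    cases hL : pvStripLines desc with
    | nil =>
      rw [pvGroupsB_nil]
      have := pvEmptyGroups_eq n hne
      simpa using this
    | cons x xs =>
      rw [pvGroupsB_cons]
      exact pvTail_eq (pvGsplit [x] xs) n
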